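-- pv_equiv track=rewrite | github.com/michael-halim/crypto-project | Utils/help_function.py | initializer
-- ===== SOURCE A (Python) =====
-- def fillZeros(bits, length=8, opt='LE'):
--     l = len(bits)
--     if opt == 'LE':
--         for i in range(l, length):
--             bits.append(0)
--     else:
--         while l < length:
--             bits.insert(0, 0)
--             l = len(bits)
--     return bits
--
-- def initializer(values):
--     binaries = [bin(int(v, 16))[2:] for v in values]
--     words = []
--     for binary in binaries:
--         word = []
--         for b in binary:
--             word.append(int(b))
--         words.append(fillZeros(word, 32, 'BE'))
--     return words
-- ===== SOURCE B (Python) =====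
-- def initializer(values):
--     words = []
--     for v in values:
--         n = int(v, 16)
--         if n < 0:
--             raise ValueError("negative hex value: %r" % v)
--         width = max(n.bit_length(), 32)
--         words.append([(n >> i) & 1 for i in reversed(range(width))])
--     return words
-- ===== Notes on version B (the rewrite author's own statement) =====
-- stated objective: alternative
-- what changed: B extracts each bit arithmetically with shifts and masks over max(bit_length, 32) positions, replacing A's bin()-string construction, per-character int() parsing and the separate front-insertion padding loop; like A it raises ValueError on unparsable or negative hex values.
import Mathlib
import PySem

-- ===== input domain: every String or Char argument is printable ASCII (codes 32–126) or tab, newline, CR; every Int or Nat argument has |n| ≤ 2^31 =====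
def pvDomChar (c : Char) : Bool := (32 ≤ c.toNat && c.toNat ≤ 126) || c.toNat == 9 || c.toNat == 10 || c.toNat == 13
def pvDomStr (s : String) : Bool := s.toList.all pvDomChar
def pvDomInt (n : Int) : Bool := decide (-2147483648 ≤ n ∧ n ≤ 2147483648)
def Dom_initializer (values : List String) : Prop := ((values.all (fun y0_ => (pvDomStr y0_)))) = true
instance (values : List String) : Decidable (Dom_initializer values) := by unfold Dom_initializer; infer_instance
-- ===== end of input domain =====

-- B replaces A's bin()-string parse and front-insertion padding loop with direct
-- arithmetic bit extraction (shift and mask over max(bit_length, 32) positions);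
-- like A it raises ValueError on unparsable or negative hex values (outside Pre_).

-- ===== PORT A =====
-- `int(b)` on a single binary digit character
def pvCharInt (b : Char) : Int := (PySem.Int.ofChars? [b]).getD 0

-- the `else` (BE) while-loop of fillZeros: while l < length: bits.insert(0, 0).
-- Each pass prepends one 0, so the loop runs exactly (length - len(bits)) times;
-- that count is the structural fuel (kernel-reducible; same computation).
def fillZerosBEAux : Nat → List Int → List Int
  | 0, bits => bits
  | k + 1, bits => fillZerosBEAux k (0 :: bits)
def fillZerosBE (bits : List Int) (length : Int) : List Int :=
  fillZerosBEAux (length - bits.length).toNat bits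

-- fillZeros(bits, length, opt) — LE branch appends a 0 for each i in range(l, length)
def fillZeros (bits : List Int) (length : Int) (opt : String) : List Int :=
  if opt = "LE" then
    (PySem.List.pyRange (bits.length : Int) length 1).foldl (fun acc _ => acc ++ [0]) bits
  else fillZerosBE bits length

def initializer (values : List String) : List (List Int) :=
  -- binaries = [bin(int(v, 16))[2:] for v in values]
  let binaries := values.map (fun v =>
    PySem.List.slice (PySem.Int.toBinChars0b ((PySem.Int.ofStrBase? v 16).getD 0)) (some 2) none)
  binaries.foldl (fun words binary =>
    words ++ [fillZeros (binary.foldl (fun word b => word ++ [pvCharInt b]) []) 32 "BE"]) []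

-- ===== PORT B =====
def initializer_alt (values : List String) : List (List Int) :=
  values.foldl (fun words v =>
    let n : Int := (PySem.Int.ofStrBase? v 16).getD 0
    if n < 0 then words ++ [[]]  -- Source B raises ValueError here; outside Pre_, value unclaimed
    else
      let width := max (PySem.Int.bitLength n) 32
      words ++ [((List.range width).reverse).map (fun (i : Nat) => PySem.Int.band (n >>> i) 1)]) []

-- ===== PRECONDITION & SPEC =====
-- Pre_ excludes exactly the inputs on which the Python A raises ValueError:
-- a value that int(v, 16) cannot parse, or one whose parsed value is negative
-- (then bin(n)[2:] starts with 'b' and int('b') raises). B raises there too.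
def Pre_initializer (values : List String) : Prop :=
  ∀ v ∈ values, 0 ≤ (PySem.Int.ofStrBase? v 16).getD (-1)
instance (values : List String) : Decidable (Pre_initializer values) := by
  unfold Pre_initializer; infer_instance
def pvWitness_initializer : List String := ["1F", "0", "ffffffffff"]

def Spec_initializer (values : List String) (out : List (List Int)) : Prop := out = initializer_alt values
instance (values : List String) (out : List (List Int)) : Decidable (Spec_initializer values out) := by unfold Spec_initializer; infer_instance

-- ===== CLAIM (what is proved, stated in full; the proofs are below) =====
def Claim_equal_initializer : Prop := ∀ (values : List String), Dom_initializer values → Pre_initializer values → Spec_initializer values (initializer values)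

-- ===== LEMMAS AND PROOFS =====

-- the MSB-first list of the w low bits of m
def nbits : Nat → Nat → List Int
  | 0, _ => []
  | w + 1, m => ((m / 2 ^ w % 2 : Nat) : Int) :: nbits w m

-- the digit characters bin(m)[2:] produces, for m ≥ 0 (recursion of Nat.toDigitsCore)
def nchars (m : Nat) : List Char :=
  if h : m < 2 then [Nat.digitChar m] else nchars (m / 2) ++ [Nat.digitChar (m % 2)]
decreasing_by exact Nat.div_lt_self (by omega) (by omega)

-- the integer digits A's inner loop builds from those characters
def pdigits (m : Nat) : List Int :=
  if h : m < 2 then [(m : Int)] else pdigits (m / 2) ++ [((m % 2 : Nat) : Int)]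
decreasing_by exact Nat.div_lt_self (by omega) (by omega)

theorem nbits_length (w m : Nat) : (nbits w m).length = w := by
  induction w with
  | zero => rfl
  | succ w ih => simp [nbits, ih]

theorem nbits_succ_append (w m : Nat) :
    nbits (w + 1) m = nbits w (m / 2) ++ [((m % 2 : Nat) : Int)] := by
  induction w generalizing m with
  | zero => simp [nbits]
  | succ w ih =>
    show ((m / 2 ^ (w + 1) % 2 : Nat) : Int) :: nbits (w + 1) m = _
    rw [ih m]
    have : m / 2 ^ (w + 1) = m / 2 / 2 ^ w := by
      rw [Nat.div_div_eq_div_mul, pow_succ, Nat.mul_comm]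
    rw [this]
    rfl

theorem nbits_pad (L m : Nat) (hm : m < 2 ^ L) (k : Nat) :
    nbits (L + k) m = List.replicate k 0 ++ nbits L m := by
  induction k with
  | zero => simp
  | succ k ih =>
    have hlt : m < 2 ^ (L + k) :=
      lt_of_lt_of_le hm (Nat.pow_le_pow_right (by omega) (by omega))
    show ((m / 2 ^ (L + k) % 2 : Nat) : Int) :: nbits (L + k) m = _
    rw [Nat.div_eq_of_lt hlt, ih, List.replicate_succ]
    rfl

theorem toDigitsCore_acc (fuel : Nat) : ∀ (m : Nat) (ds : List Char),
    Nat.toDigitsCore 2 fuel m ds = Nat.toDigitsCore 2 fuel m [] ++ ds := by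
  induction fuel with
  | zero => intro m ds; rfl
  | succ fuel ih =>
    intro m ds
    simp only [Nat.toDigitsCore]
    by_cases h : m / 2 = 0
    · simp [h]
    · simp only [h, if_neg]
      rw [ih (m / 2) [Nat.digitChar (m % 2)], ih (m / 2) (Nat.digitChar (m % 2) :: ds)]
      simp

theorem toDigitsCore_eq_nchars (fuel : Nat) : ∀ (m : Nat), m < fuel →
    Nat.toDigitsCore 2 fuel m [] = nchars m := by
  induction fuel with
  | zero => intro m h; omega
  | succ fuel ih =>
    intro m h
    rw [nchars]
    simp only [Nat.toDigitsCore]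
    by_cases h2 : m < 2
    · have hd : m / 2 = 0 := by omega
      have hm : m % 2 = m := by omega
      simp [hd, hm, h2]
    · have hd : ¬ m / 2 = 0 := by omega
      simp only [hd, dif_neg h2]
      simp only [beq_iff_eq, hd, if_false]
      rw [toDigitsCore_acc, ih (m / 2) (by omega)]

theorem toDigits_eq_nchars (m : Nat) : Nat.toDigits 2 m = nchars m :=
  toDigitsCore_eq_nchars (m + 1) m (by omega)

theorem map_pvCharInt_nchars (m : Nat) : (nchars m).map pvCharInt = pdigits m := by
  induction m using Nat.strong_induction_on with
  | _ m ih =>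
    rw [nchars, pdigits]
    by_cases h : m < 2
    · interval_cases m <;> simp [pvCharInt] <;> decide
    · have hr : m % 2 < 2 := Nat.mod_lt _ (by omega)
      rw [dif_neg h, dif_neg h, List.map_append, ih (m / 2) (Nat.div_lt_self (by omega) (by omega))]
      congr 1
      interval_cases h2 : m % 2 <;> simp [pvCharInt] <;> decide

theorem pdigits_eq_nbits (m : Nat) :
    pdigits m = nbits (max (PySem.Int.bitLength (m : Int)) 1) m := by
  induction m using Nat.strong_induction_on with
  | _ m ih =>
    rw [pdigits]
    by_cases h : m < 2
    · interval_cases m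
      · rw [dif_pos (by omega)]
        simp [PySem.Int.bitLength_zero, nbits]
      · rw [dif_pos (by omega)]
        have h1 : PySem.Int.bitLength ((1 : Nat) : Int) = 1 := by decide
        simp only [Nat.cast_one] at h1 ⊢
        rw [h1]
        simp [nbits]
    · have hpos : 0 < m / 2 := by omega
      have hbl : PySem.Int.bitLength (m : Int) = PySem.Int.bitLength ((m / 2 : Nat) : Int) + 1 :=
        PySem.Int.bitLength_natCast (by omega)
      have hbl2 : 1 ≤ PySem.Int.bitLength ((m / 2 : Nat) : Int) := by
        rw [PySem.Int.bitLength_natCast hpos]; omega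
      rw [dif_neg h, ih (m / 2) (Nat.div_lt_self (by omega) (by omega))]
      rw [Nat.max_eq_left hbl2, hbl, Nat.max_eq_left (by omega), nbits_succ_append]

theorem fillZerosBEAux_eq (k : Nat) : ∀ (bits : List Int),
    fillZerosBEAux k bits = List.replicate k 0 ++ bits := by
  induction k with
  | zero => intro bits; rfl
  | succ k ih =>
    intro bits
    show fillZerosBEAux k (0 :: bits) = _
    rw [ih, List.replicate_succ']
    simp

theorem fillZerosBE_eq (L : Nat) (k : Nat) (bits : List Int) (hk : L - bits.length = k) :
    fillZerosBE bits (L : Int) = List.replicate k 0 ++ bits := by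
  unfold fillZerosBE
  rw [show ((L : Int) - bits.length).toNat = k by omega, fillZerosBEAux_eq]

theorem range_reverse_map_eq_nbits (m : Nat) (w : Nat) :
    ((List.range w).reverse).map (fun (i : Nat) => PySem.Int.band ((m : Int) >>> i) 1) = nbits w m := by
  induction w with
  | zero => rfl
  | succ w ih =>
    rw [List.range_succ]
    simp only [List.reverse_append, List.reverse_singleton, List.singleton_append, List.map_cons]
    rw [ih]
    show PySem.Int.band ((m : Int) >>> w) 1 :: _ = ((m / 2 ^ w % 2 : Nat) : Int) :: _
    congr 1
    rw [← Int.natCast_shiftRight, PySem.Int.band_one]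
    have : ((2 : Int)) = ((2 : Nat) : Int) := by norm_num
    rw [this, PySem.Int.mod_natCast]
    rw [Nat.shiftRight_eq_div_pow]

-- m is below 2 ^ max(bitLength m, 1)
theorem m_lt_pow (m : Nat) : m < 2 ^ (max (PySem.Int.bitLength (m : Int)) 1) := by
  have h := PySem.Int.lt_two_pow_bitLength (m : Int)
  simp only [Int.natAbs_natCast] at h
  exact lt_of_lt_of_le h (Nat.pow_le_pow_right (by omega) (Nat.le_max_left _ _))

-- the per-element equality, for a parsed nonnegative value n
theorem elem_eq (n : Int) (hn : 0 ≤ n) :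
    fillZeros ((PySem.List.slice (PySem.Int.toBinChars0b n) (some 2) none).foldl
        (fun word b => word ++ [pvCharInt b]) []) 32 "BE"
      = ((List.range (max (PySem.Int.bitLength n) 32)).reverse).map
          (fun (i : Nat) => PySem.Int.band (n >>> i) 1) := by
  obtain ⟨m, rfl⟩ : ∃ m : Nat, n = (m : Int) := ⟨n.toNat, (Int.toNat_of_nonneg hn).symm⟩
  -- A's binary string: bin(m)[2:] = toDigits 2 m = nchars m
  have hbin : PySem.List.slice (PySem.Int.toBinChars0b (m : Int)) (some 2) none
      = nchars m := by
    rw [PySem.List.slice_from _ (by omega : (0:Int) ≤ (2:Int))]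
    have hneg : ¬ ((m : Int) < 0) := by omega
    simp [PySem.Int.toBinChars0b, hneg, toDigits_eq_nchars]
  rw [hbin, PySem.List.foldl_append_singleton_eq_map, List.nil_append,
      map_pvCharInt_nchars, pdigits_eq_nbits]
  -- unfold fillZeros to the BE branch
  have hopt : ¬ (("BE" : String) = "LE") := by decide
  rw [fillZeros, if_neg hopt]
  set L := max (PySem.Int.bitLength (m : Int)) 1 with hL
  have hlen : (nbits L m).length = L := nbits_length L m
  have hmlt : m < 2 ^ L := m_lt_pow m
  rw [range_reverse_map_eq_nbits]
  by_cases hc : L ≤ 32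
  · have h32 : max (PySem.Int.bitLength (m : Int)) 32 = 32 := by omega
    have hsplit : (32 : Nat) = L + (32 - L) := by omega
    rw [h32, hsplit, nbits_pad L m hmlt (32 - L)]
    have : (32 : Int) = ((L + (32 - L) : Nat) : Int) := by omega
    rw [this, fillZerosBE_eq (L + (32 - L)) (32 - L) (nbits L m) (by omega)]
  · have h32 : max (PySem.Int.bitLength (m : Int)) 32 = L := by omega
    rw [h32]
    have : (32 : Int) = ((32 : Nat) : Int) := by norm_num
    rw [this, fillZerosBE_eq 32 0 (nbits L m) (by omega)]
    simp

-- ===== VERDICT (by name: the statement is the Claim_ definition above) =====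
theorem initializer_spec : Claim_equal_initializer := by
  intro values _ hpre
  unfold Spec_initializer initializer initializer_alt
  simp only
  rw [List.foldl_map, PySem.List.foldl_append_singleton_eq_map, List.nil_append]
  have hc := PySem.List.foldl_congr_mem (l := values) (init := ([] : List (List Int)))
    (f := fun words v =>
      if (PySem.Int.ofStrBase? v 16).getD 0 < 0 then words ++ [[]]
      else words ++
        [List.map (fun (i : Nat) => PySem.Int.band ((PySem.Int.ofStrBase? v 16).getD 0 >>> i) 1)
          (List.range (max (PySem.Int.bitLength ((PySem.Int.ofStrBase? v 16).getD 0)) 32)).reverse])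
    (g := fun words v =>
      words ++
        [List.map (fun (i : Nat) => PySem.Int.band ((PySem.Int.ofStrBase? v 16).getD 0 >>> i) 1)
          (List.range (max (PySem.Int.bitLength ((PySem.Int.ofStrBase? v 16).getD 0)) 32)).reverse])
    (by
      intro acc v hv
      have hp := hpre v hv
      have hnn : ¬ ((PySem.Int.ofStrBase? v 16).getD 0 < 0) := by
        cases h : PySem.Int.ofStrBase? v 16 with
        | none => simp
        | some k => rw [h] at hp; simp at hp ⊢; omega
      simp only [hnn, if_false])
  rw [hc, PySem.List.foldl_append_singleton_eq_map, List.nil_append]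
  apply List.map_congr_left
  intro v hv
  have hp := hpre v hv
  set n := (PySem.Int.ofStrBase? v 16).getD 0 with hn
  have hnn : 0 ≤ n := by
    cases h : PySem.Int.ofStrBase? v 16 with
    | none => simp [hn, h]
    | some k => rw [h] at hp; simp at hp; simp [hn, h]; omega
  exact elem_eq n hnn
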